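-- pv_equiv track=rewrite | github.com/MarcosBianchii/Teoria-de-Algoritmos | guias/reducciones/10.py | verificador_mochila
-- ===== SOURCE A (Python) =====
-- def verificador_mochila(elementos, v, w, mochila):
--     """
--     La complejidad del verificador es O(n)
--     """
--     # O(n)
--     if sum(x[0] for x in mochila) > w:
--         return False
--
--     # O(n)
--     if sum(x[1] for x in mochila) < v:
--         return False
--
--     # O(n)
--     elementos = set(elementos)
--     if any(x not in elementos for x in mochila):
--         return False
--
--     return True
-- ===== SOURCE B (Python) =====
-- def verificador_mochila(elementos, v, w, mochila):
--     """Recursive budget-decrementing check: each item consumes remaining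
--     capacity w and remaining required value v; no sums are computed."""
--     elems = set(elementos)
--
--     def go(v, w, items):
--         if not items:
--             return v <= 0 <= w
--         x = items[0]
--         return x in elems and go(v - x[1], w - x[0], items[1:])
--
--     return go(v, w, mochila)
-- ===== Notes on version B (the rewrite author's own statement) =====
-- stated objective: alternative
-- what changed: A computes two full sums over mochila and a separate membership scan with early returns; B recurses over mochila threading the remaining capacity and remaining required value downward (budget decrementing, short-circuiting on a non-member), accepting at the end iff the leftover budgets are feasible - no sums are ever formed.
import Mathlib
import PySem

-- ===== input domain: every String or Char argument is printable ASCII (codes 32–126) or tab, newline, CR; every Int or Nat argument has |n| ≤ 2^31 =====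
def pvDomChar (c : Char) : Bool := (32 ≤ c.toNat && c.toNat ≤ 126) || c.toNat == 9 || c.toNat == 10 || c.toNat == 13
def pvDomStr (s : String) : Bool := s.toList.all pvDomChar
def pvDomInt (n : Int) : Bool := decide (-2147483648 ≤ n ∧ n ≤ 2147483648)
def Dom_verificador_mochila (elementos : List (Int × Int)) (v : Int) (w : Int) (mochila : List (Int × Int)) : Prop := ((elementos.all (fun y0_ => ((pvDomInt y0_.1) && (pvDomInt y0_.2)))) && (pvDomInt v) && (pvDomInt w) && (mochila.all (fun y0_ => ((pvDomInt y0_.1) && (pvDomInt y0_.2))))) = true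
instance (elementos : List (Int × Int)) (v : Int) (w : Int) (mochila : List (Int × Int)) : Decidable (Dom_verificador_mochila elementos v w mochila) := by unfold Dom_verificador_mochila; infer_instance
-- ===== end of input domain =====

-- B replaces A's two sums plus membership scan with a recursive budget-decrementing
-- check over mochila (alternative decomposition, no speed claim).

-- ===== PORT A =====
def verificador_mochila (elementos : List (Int × Int)) (v : Int) (w : Int) (mochila : List (Int × Int)) : Bool :=
  if mochila.foldl (fun a x => a + x.1) 0 > w then false
  else if mochila.foldl (fun a x => a + x.2) 0 < v then false
  else
    let s := PySem.Set.ofList elementos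
    if mochila.any (fun x => !(PySem.Set.contains s x)) then false
    else true

-- ===== PORT B =====
def vmGo (s : PySem.Set (Int × Int)) : Int → Int → List (Int × Int) → Bool
  | v, w, [] => decide (v ≤ 0) && decide (0 ≤ w)
  | v, w, x :: rest => PySem.Set.contains s x && vmGo s (v - x.2) (w - x.1) rest

def verificador_mochila_alt (elementos : List (Int × Int)) (v : Int) (w : Int) (mochila : List (Int × Int)) : Bool :=
  vmGo (PySem.Set.ofList elementos) v w mochila

-- ===== PRECONDITION & SPEC =====
def Spec_verificador_mochila (elementos : List (Int × Int)) (v : Int) (w : Int) (mochila : List (Int × Int)) (out : Bool) : Prop := out = verificador_mochila_alt elementos v w mochila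
instance (elementos : List (Int × Int)) (v : Int) (w : Int) (mochila : List (Int × Int)) (out : Bool) : Decidable (Spec_verificador_mochila elementos v w mochila out) := by unfold Spec_verificador_mochila; infer_instance

-- ===== CLAIM (what is proved, stated in full; the proofs are below) =====
def Claim_equal_verificador_mochila : Prop := ∀ (elementos : List (Int × Int)) (v : Int) (w : Int) (mochila : List (Int × Int)), Dom_verificador_mochila elementos v w mochila → Spec_verificador_mochila elementos v w mochila (verificador_mochila elementos v w mochila)

-- ===== LEMMAS AND PROOFS =====
theorem pv_shift1 (t : List (Int × Int)) : ∀ (z : Int), t.foldl (fun a x => a + x.1) z = z + t.foldl (fun a x => a + x.1) 0 := by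
  induction t with
  | nil => simp
  | cons u r ih => intro z; simp only [List.foldl_cons]; rw [ih (z + u.1), ih (0 + u.1)]; ring

theorem pv_shift2 (t : List (Int × Int)) : ∀ (z : Int), t.foldl (fun a x => a + x.2) z = z + t.foldl (fun a x => a + x.2) 0 := by
  induction t with
  | nil => simp
  | cons u r ih => intro z; simp only [List.foldl_cons]; rw [ih (z + u.2), ih (0 + u.2)]; ring

theorem pv_vmGo_eq (s : PySem.Set (Int × Int)) (l : List (Int × Int)) : ∀ (v w : Int),
    vmGo s v w l
      = (decide (l.foldl (fun a x => a + x.1) 0 ≤ w)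
          && decide (v ≤ l.foldl (fun a x => a + x.2) 0)
          && l.all (fun x => PySem.Set.contains s x)) := by
  induction l with
  | nil =>
    intro v w
    simp only [vmGo, List.foldl_nil, List.all_nil, Bool.and_true]
    exact Bool.and_comm _ _
  | cons x t ih =>
    intro v w
    simp only [vmGo, ih, List.foldl_cons, List.all_cons]
    simp only [pv_shift1 t (0 + x.1), pv_shift2 t (0 + x.2)]
    rw [Bool.eq_iff_iff]
    simp only [Bool.and_eq_true, decide_eq_true_iff, and_assoc]
    constructor
    · rintro ⟨hc, h1, h2, ha⟩; exact ⟨by omega, by omega, hc, ha⟩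
    · rintro ⟨h1, h2, hc, ha⟩; exact ⟨hc, by omega, by omega, ha⟩

theorem pv_any_not_all (l : List (Int × Int)) (p : Int × Int → Bool) :
    l.any (fun x => !(p x)) = !(l.all p) := by
  induction l with
  | nil => rfl
  | cons y t ih => simp [ih]

-- ===== VERDICT (by name: the statement is the Claim_ definition above) =====
theorem verificador_mochila_spec : Claim_equal_verificador_mochila := by
  intro elementos v w mochila _
  unfold Spec_verificador_mochila verificador_mochila verificador_mochila_alt
  simp only [pv_vmGo_eq, pv_any_not_all]
  set sw := mochila.foldl (fun a x => a + x.1) 0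
  set sv := mochila.foldl (fun a x => a + x.2) 0
  by_cases h1 : sw > w
  · simp [h1, show ¬ sw ≤ w by omega]
  · by_cases h2 : sv < v
    · simp [h2, show ¬ v ≤ sv by omega]
    · simp only [if_neg h1, if_neg h2, show sw ≤ w by omega, show v ≤ sv by omega,
        decide_true, Bool.true_and]
      cases mochila.all (fun x => PySem.Set.contains (PySem.Set.ofList elementos) x) <;> simp
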